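-- pv_equiv track=rewrite | github.com/SVCE-ACM/A-December-of-Algorithms-2021 | December-01/python3_dsaghicha.py | common_char
-- ===== SOURCE A (Python) =====
-- def common_char(all_str: list[str]) -> int:
--     """
--     Identifies common characters in words of a list.
--
--     Keyword Arguments:
--     all_str: List of words
--
--     Returns number of letters repeated.
--     """
--     rep_letters: int = 0
--     limit: int = len(all_str)
--     char_dict: dict[str: list[int]] = {}
--
--     for word in all_str:
--         unique: set[str] = set(word)
--         for letter in unique:
--             occurrence: int = word.count(letter)
--             try:
--                 char_dict[letter].append(occurrence)
--             except KeyError: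
--                 char_dict[letter] = [occurrence]
--
--     for key in char_dict:
--         if len(char_dict[key]) == limit:
--             rep_letters += 1
--     return rep_letters
-- ===== SOURCE B (Python) =====
-- def common_char(all_str: list[str]) -> int:
--     """Count the characters that occur in every word of the list."""
--     if not all_str:
--         return 0
--     common = set(all_str[0])
--     for word in all_str[1:]:
--         common &= set(word)
--     return len(common)
-- ===== Notes on version B (the rewrite author's own statement) =====
-- stated objective: faster
-- what changed: B replaces A's occurrence-list dictionary (a word.count scan per distinct letter of each word) by a running set intersection over the words, returning its size.
import Mathlib
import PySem

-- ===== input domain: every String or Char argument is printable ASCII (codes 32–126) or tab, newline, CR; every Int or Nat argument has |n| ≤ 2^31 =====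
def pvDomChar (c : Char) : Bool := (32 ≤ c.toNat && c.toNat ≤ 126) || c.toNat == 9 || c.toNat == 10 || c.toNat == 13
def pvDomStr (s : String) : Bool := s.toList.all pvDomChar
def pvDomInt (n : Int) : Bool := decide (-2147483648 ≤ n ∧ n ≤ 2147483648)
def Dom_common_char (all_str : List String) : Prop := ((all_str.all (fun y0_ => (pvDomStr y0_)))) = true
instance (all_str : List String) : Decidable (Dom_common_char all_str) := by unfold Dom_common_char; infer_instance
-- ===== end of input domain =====

-- B replaces A's occurrence-list dictionary (built with word.count per distinct letter)
-- by a running set intersection over the words; objective: faster (measured).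

-- ===== PORT A =====
def common_char (all_str : List String) : Int :=
  let limit : Nat := all_str.length
  let char_dict : PySem.Dict Char (List Int) :=
    all_str.foldl (fun d word =>
      (PySem.Set.ofList word.toList).foldl (fun d letter =>
        let occurrence : Int := (PySem.Str.count word (String.singleton letter) : Int)
        match d.get? letter with
        | some l => d.insert letter (l ++ [occurrence])
        | none   => d.insert letter [occurrence]) d) PySem.Dict.empty
  char_dict.keys.foldl (fun rep key =>
    if (char_dict.getD key []).length = limit then rep + 1 else rep) 0

-- ===== PORT B =====
def common_char_alt (all_str : List String) : Int :=
  match all_str with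
  | [] => 0
  | first :: rest =>
      PySem.Set.len
        (rest.foldl (fun common word => common.inter (PySem.Set.ofList word.toList))
          (PySem.Set.ofList first.toList))

-- ===== PRECONDITION & SPEC =====
def Spec_common_char (all_str : List String) (out : Int) : Prop := out = common_char_alt all_str
instance (all_str : List String) (out : Int) : Decidable (Spec_common_char all_str out) := by unfold Spec_common_char; infer_instance

-- ===== CLAIM (what is proved, stated in full; the proofs are below) =====
def Claim_equal_common_char : Prop := ∀ (all_str : List String), Dom_common_char all_str → Spec_common_char all_str (common_char all_str)

-- ===== LEMMAS AND PROOFS =====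

-- The (letter, occurrence) pairs A's double loop feeds into its dictionary, flattened.
def pvPairs (L : List String) : List (Char × Int) :=
  L.flatMap (fun word => (PySem.Set.ofList word.toList).map
    (fun letter => (letter, (PySem.Str.count word (String.singleton letter) : Int))))

def pvDict (L : List String) : PySem.Dict Char (List Int) :=
  (pvPairs L).foldl (fun d p => d.modify p.1 [] (· ++ [p.2])) PySem.Dict.empty

-- A's try/except append step is exactly Dict.modify with default [].
lemma pvStep_eq_modify (d : PySem.Dict Char (List Int)) (letter : Char) (occ : Int) :
    (match d.get? letter with
     | some l => d.insert letter (l ++ [occ])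
     | none   => d.insert letter [occ]) = d.modify letter [] (· ++ [occ]) := by
  cases h : d.get? letter <;>
    simp [PySem.Dict.modify, PySem.Dict.getD_eq_get?_getD, h]

lemma pvDict_eq_modify (L : List String) (d : PySem.Dict Char (List Int)) :
    (L.foldl (fun d word =>
      (PySem.Set.ofList word.toList).foldl (fun d letter =>
        match d.get? letter with
        | some l => d.insert letter (l ++ [(PySem.Str.count word (String.singleton letter) : Int)])
        | none   => d.insert letter [(PySem.Str.count word (String.singleton letter) : Int)]) d) d)
    = L.foldl (fun d word =>
      (PySem.Set.ofList word.toList).foldl (fun d letter =>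
        d.modify letter [] (· ++ [(PySem.Str.count word (String.singleton letter) : Int)])) d) d := by
  simp only [pvStep_eq_modify]

lemma pvDict_eq (L : List String) :
    (L.foldl (fun d word =>
      (PySem.Set.ofList word.toList).foldl (fun d letter =>
        match d.get? letter with
        | some l => d.insert letter (l ++ [(PySem.Str.count word (String.singleton letter) : Int)])
        | none   => d.insert letter [(PySem.Str.count word (String.singleton letter) : Int)]) d)
      PySem.Dict.empty) = pvDict L := by
  rw [pvDict_eq_modify]
  unfold pvDict pvPairs
  generalize (PySem.Dict.empty : PySem.Dict Char (List Int)) = d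
  induction L generalizing d with
  | nil => rfl
  | cons w ws ih =>
    simp only [List.foldl_cons, List.flatMap_cons, List.foldl_append, List.foldl_map, ih]

lemma pvDict_getD_length (L : List String) (c : Char) :
    ((pvDict L).getD c []).length = L.countP (fun w => decide (c ∈ w.toList)) := by
  unfold pvDict
  rw [PySem.Dict.getD_foldl_modify_append]
  simp only [PySem.Dict.getD_empty, List.nil_append, List.length_map]
  unfold pvPairs
  induction L with
  | nil => rfl
  | cons w ws ih =>
    simp only [List.flatMap_cons, List.filter_append, List.length_append, ih,
      List.countP_cons, List.filter_map, List.length_map]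
    have h1 : (List.filter ((fun p => p.1 == c) ∘
        (fun letter => (letter, (PySem.Str.count w (String.singleton letter) : Int))))
        (PySem.Set.ofList w.toList)).length
        = if c ∈ w.toList then 1 else 0 := by
      have : ((fun p => p.1 == c) ∘
          (fun letter : Char => (letter, (PySem.Str.count w (String.singleton letter) : Int))))
          = (fun letter : Char => letter == c) := rfl
      rw [this, ← List.countP_eq_length_filter]
      have hcnt : (PySem.Set.ofList w.toList).countP (fun letter => letter == c)
          = (PySem.Set.ofList w.toList).count c := rfl
      rw [hcnt]
      by_cases h : c ∈ w.toList
      · rw [List.count_eq_one_of_mem (PySem.Set.nodup_ofList _)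
          ((PySem.Set.mem_ofList _ _).mpr h)]
        simp [h]
      · rw [List.count_eq_zero_of_not_mem (fun hc => h ((PySem.Set.mem_ofList _ _).mp hc))]
        simp [h]
    rw [h1]
    by_cases h : c ∈ w.toList <;> simp [h, Nat.add_comm]

lemma pvDict_keys_nodup (L : List String) : (pvDict L).keys.Nodup := by
  unfold pvDict
  exact PySem.Dict.nodup_keys_foldl_modify_key (pvPairs L) (fun p : Char × Int => p.1) []
    (fun d (p : Char × Int) => (· ++ [p.2])) PySem.Dict.empty PySem.Dict.nodup_keys_empty

lemma pvDict_mem_keys (L : List String) (c : Char) :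
    c ∈ (pvDict L).keys ↔ ∃ w ∈ L, c ∈ w.toList := by
  unfold pvDict
  rw [PySem.Dict.keys_foldl_modify_key]
  rw [PySem.Set.mem_update]
  simp [pvPairs, PySem.Dict.keys_empty, List.mem_flatMap, PySem.Set.mem_ofList]

-- A's final loop counts the keys whose list has full length.
lemma common_char_eq_countP (L : List String) :
    common_char L = ((pvDict L).keys.countP
      (fun k => decide (((pvDict L).getD k []).length = L.length)) : Int) := by
  show ((L.foldl _ PySem.Dict.empty).keys.foldl _ 0 : Int) = _
  rw [pvDict_eq]
  have h : (fun (rep : Int) (key : Char) =>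
      if ((pvDict L).getD key []).length = L.length then rep + 1 else rep)
      = (fun rep key =>
        if (fun k => decide (((pvDict L).getD k []).length = L.length)) key = true
        then rep + 1 else rep) := by
    funext rep key; simp
  rw [h, PySem.List.foldl_count_if]
  simp

-- B's running intersection: nodup, and membership means "in the seed and in every word".
lemma pvInter_spec (ws : List String) (s : PySem.Set Char) (hs : s.Nodup) :
    (ws.foldl (fun common word => common.inter (PySem.Set.ofList word.toList)) s).Nodup ∧
    ∀ c, c ∈ ws.foldl (fun common word => common.inter (PySem.Set.ofList word.toList)) s ↔
      c ∈ s ∧ ∀ w ∈ ws, c ∈ w.toList := by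
  induction ws generalizing s with
  | nil => exact ⟨hs, fun c => by simp⟩
  | cons w ws ih =>
    have hs' : (s.inter (PySem.Set.ofList w.toList)).Nodup := List.Nodup.filter _ hs
    obtain ⟨h1, h2⟩ := ih (s.inter (PySem.Set.ofList w.toList)) hs'
    refine ⟨h1, fun c => ?_⟩
    rw [List.foldl_cons, h2, PySem.Set.mem_inter, PySem.Set.mem_ofList]
    constructor
    · rintro ⟨⟨hcs, hcw⟩, hall⟩
      refine ⟨hcs, fun w' hw' => ?_⟩
      rcases List.mem_cons.mp hw' with h | h
      · exact h ▸ hcw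
      · exact hall w' h
    · rintro ⟨hcs, hall⟩
      exact ⟨⟨hcs, hall w (by simp)⟩, fun w' hw' => hall w' (by simp [hw'])⟩

-- ===== VERDICT (by name: the statement is the Claim_ definition above) =====
theorem common_char_spec : Claim_equal_common_char := by
  intro L _
  unfold Spec_common_char
  rw [common_char_eq_countP]
  cases L with
  | nil =>
    have : pvDict [] = PySem.Dict.empty := rfl
    simp [this, common_char_alt, PySem.Dict.keys_empty]
  | cons first rest =>
    set L := first :: rest with hL
    obtain ⟨hnd, hmem⟩ := pvInter_spec rest (PySem.Set.ofList first.toList)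
      (PySem.Set.nodup_ofList _)
    set I := rest.foldl (fun common word => common.inter (PySem.Set.ofList word.toList))
      (PySem.Set.ofList first.toList) with hI
    have halt : common_char_alt L = (I.length : Int) := rfl
    rw [halt, List.countP_eq_length_filter]
    congr 1
    apply List.Perm.length_eq
    rw [List.perm_ext_iff_of_nodup (List.Nodup.filter _ (pvDict_keys_nodup L)) hnd]
    intro c
    rw [List.mem_filter, hmem c, PySem.Set.mem_ofList, pvDict_mem_keys, decide_eq_true_eq,
      pvDict_getD_length]
    constructor
    · rintro ⟨⟨w, hwL, hcw⟩, hcount⟩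
      have hall : ∀ w' ∈ L, c ∈ w'.toList := by
        intro w' hw'
        have := List.countP_eq_length.mp hcount
        simpa using this w' hw'
      exact ⟨hall first (by simp [hL]), fun w' hw' => hall w' (by simp [hL, hw'])⟩
    · rintro ⟨hfirst, hall⟩
      have hallL : ∀ w' ∈ L, c ∈ w'.toList := by
        intro w' hw'
        rcases (by simpa [hL] using hw' : w' = first ∨ w' ∈ rest) with h | h
        · exact h ▸ hfirst
        · exact hall w' h
      refine ⟨⟨first, by simp [hL], hfirst⟩, ?_⟩
      exact List.countP_eq_length.mpr (fun w' hw' => by simpa using hallL w' hw')
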